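-- pv_equiv track=rewrite | github.com/Eckreh/BHN-Tool | helper_functions.py | preplace_ones
-- ===== SOURCE A (Python) =====
-- import copy
--
-- def preplace_ones(arr, num_ones):
--     """
--     Replaces 0s in an array with 1s, infront of a 1 bock, based on the specified number.
--
--     Parameters
--     ----------
--     - arr (list): The original list where 0s may be replaced with 1s.
--     - num_ones (int): The number of preceding 1s to be added
--
--     Returns
--     -------
--     - list: A modified list where 0s have been replaced with 1s based on the specified number
--
--     Example
--     --------
--     >>> preplace_ones([0, 0, 1, 1, 0, 0, 1, 1, 0], 1)
--                       [0, 1, 1, 1, 0, 1, 1, 1, 0]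
--     """
--
--     arr_copy = copy.deepcopy(arr)
--     for i in range(len(arr_copy)):
--         if arr_copy[i] == 1:
--             for j in range(1, num_ones + 1):
--                 if i - j >= 0 and arr[i - j] == 0:
--                     arr_copy[i - j] = 1
--                 else:
--                     break
--     return arr_copy
-- ===== SOURCE B (Python) =====
-- def preplace_ones(arr, num_ones):
--     # Single right-to-left pass: keep a budget d of remaining fills before the
--     # nearest 1 reached through zeros; O(n) instead of O(n * num_ones).
--     out = []
--     d = 0
--     for x in reversed(arr):
--         if x == 1:
--             d = num_ones
--             out.append(1)
--         elif x == 0 and d > 0: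
--             d -= 1
--             out.append(1)
--         else:
--             d = 0
--             out.append(x)
--     out.reverse()
--     return out
-- ===== Notes on version B (the rewrite author's own statement) =====
-- stated objective: faster
-- what changed: A scans forward and, for every 1, walks backward up to num_ones positions filling zeros; B makes a single right-to-left pass keeping a remaining-fill budget that is reset at each 1, decremented through zeros and cleared at any other value.
import Mathlib
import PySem

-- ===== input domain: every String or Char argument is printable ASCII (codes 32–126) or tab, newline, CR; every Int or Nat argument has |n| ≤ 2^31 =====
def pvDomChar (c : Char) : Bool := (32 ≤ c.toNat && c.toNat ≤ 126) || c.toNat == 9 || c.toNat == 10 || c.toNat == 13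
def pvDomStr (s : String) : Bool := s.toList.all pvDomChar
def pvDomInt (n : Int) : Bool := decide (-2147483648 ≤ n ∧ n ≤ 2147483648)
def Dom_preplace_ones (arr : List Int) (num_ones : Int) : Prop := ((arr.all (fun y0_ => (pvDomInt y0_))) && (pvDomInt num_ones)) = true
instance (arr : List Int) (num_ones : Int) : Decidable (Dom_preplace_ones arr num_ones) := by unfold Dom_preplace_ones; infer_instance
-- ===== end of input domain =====

-- B replaces A's quadratic scan (per 1, walk back up to num_ones zeros) by one
-- right-to-left pass keeping a remaining-fill budget; objective: faster (O(n)).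

-- ===== PORT A =====
-- inner 'for j in range(1, num_ones+1): … else: break' loop of A
def innerA (arr : List Int) (i : Int) : List Int → List Int → List Int
  | [], acc => acc
  | j :: js, acc =>
    if 0 ≤ i - j ∧ PySem.List.pyGet? arr (i - j) = some 0 then
      innerA arr i js (acc.set (i - j).toNat 1)
    else acc

-- body of A's outer 'for i in range(len(arr_copy))' loop
def stepA (arr : List Int) (num_ones : Int) (acc : List Int) (i : Int) : List Int :=
  if PySem.List.pyGet? acc i = some 1 then
    innerA arr i (PySem.List.pyRange 1 (num_ones + 1) 1) acc
  else acc

def preplace_ones (arr : List Int) (num_ones : Int) : List Int :=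
  (PySem.List.pyRange 0 (arr.length : Int) 1).foldl (stepA arr num_ones) arr

-- ===== PORT B =====
def preplace_ones_alt (arr : List Int) (num_ones : Int) : List Int :=
  let s := arr.reverse.foldl
    (fun (s : Int × List Int) x =>
      if x = 1 then (num_ones, s.2 ++ [1])
      else if x = 0 ∧ 0 < s.1 then (s.1 - 1, s.2 ++ [1])
      else (0, s.2 ++ [x]))
    ((0 : Int), ([] : List Int))
  s.2.reverse

-- ===== PRECONDITION & SPEC =====
def Spec_preplace_ones (arr : List Int) (num_ones : Int) (out : List Int) : Prop := out = preplace_ones_alt arr num_ones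
instance (arr : List Int) (num_ones : Int) (out : List Int) : Decidable (Spec_preplace_ones arr num_ones out) := by unfold Spec_preplace_ones; infer_instance

-- ===== CLAIM (what is proved, stated in full; the proofs are below) =====
def Claim_equal_preplace_ones : Prop := ∀ (arr : List Int) (num_ones : Int), Dom_preplace_ones arr num_ones → Spec_preplace_ones arr num_ones (preplace_ones arr num_ones)

-- ===== LEMMAS AND PROOFS =====

-- number of leading zeros of a list
def lzf : List Int → Nat
  | [] => 0
  | x :: xs => if x = 0 then lzf xs + 1 else 0

-- position k is filled after A has processed indices < i
abbrev Fb (arr : List Int) (num_ones : Int) (i k : Nat) : Prop :=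
  arr.getD k 0 = 0 ∧ (arr.drop (k+1)).getD (lzf (arr.drop (k+1))) 0 = 1 ∧
    ((lzf (arr.drop (k+1)) : Int) < num_ones) ∧ k + 1 + lzf (arr.drop (k+1)) < i

-- position k is newly filled while A processes index i (a one at i, zeros from k to i-1, within budget)
abbrev Nf (arr : List Int) (num_ones : Int) (i k : Nat) : Prop :=
  arr.getD k 0 = 0 ∧ k < i ∧ ((i:Int) - (k:Int) ≤ num_ones) ∧
    ∀ t, t < i → k ≤ t → arr.getD t 0 = 0

def fillF (arr : List Int) (num_ones : Int) (i : Nat) : List Int :=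
  arr.mapIdx (fun k v => if Fb arr num_ones i k then 1 else v)

-- state of arr_copy in the middle of A's inner loop at index i, next j to try = a
def gF (arr : List Int) (num_ones : Int) (i : Nat) (a : Int) : List Int :=
  arr.mapIdx (fun k v => if Fb arr num_ones i k ∨ (Nf arr num_ones i k ∧ (i:Int) - (k:Int) < a) then 1 else v)

-- structural form of B's right-to-left pass
def altGo (num_ones : Int) : List Int → Int × List Int
  | [] => (0, [])
  | x :: rest =>
    let s := altGo num_ones rest
    if x = 1 then (num_ones, 1 :: s.2)
    else if x = 0 ∧ 0 < s.1 then (s.1 - 1, 1 :: s.2)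
    else (0, x :: s.2)

-- final shape both programs compute
def specL (arr : List Int) (num_ones : Int) : List Int :=
  arr.mapIdx (fun k v =>
    if v = 0 ∧ (arr.drop (k+1)).getD (lzf (arr.drop (k+1))) 0 = 1 ∧
        ((lzf (arr.drop (k+1)) : Int) < num_ones) then 1 else v)

lemma getD_drop (l : List Int) (n m : Nat) : (l.drop n).getD m 0 = l.getD (n + m) 0 := by
  simp [List.getD_eq_getElem?_getD, List.getElem?_drop]

lemma lzf_zero_lt (l : List Int) : ∀ r, r < lzf l → l.getD r 0 = 0 := by
  induction l with
  | nil => intro r hr; simp [lzf] at hr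
  | cons x xs ih =>
    intro r hr
    by_cases hx : x = 0
    · simp only [lzf, if_pos hx] at hr
      cases r with
      | zero => simpa using hx
      | succ r => simpa using ih r (by omega)
    · simp [lzf, hx] at hr

lemma lzf_lt_length {l : List Int} (h : l.getD (lzf l) 0 = 1) : lzf l < l.length := by
  by_cases h' : lzf l < l.length
  · exact h'
  · rw [List.getD_eq_default _ _ (by omega)] at h
    exact absurd h (by norm_num)

lemma lzf_eq {l : List Int} {m : Nat} (hm : m < l.length)
    (h0 : ∀ r, r < m → l.getD r 0 = 0) (h1 : l.getD m 0 ≠ 0) : lzf l = m := by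
  induction l generalizing m with
  | nil => simp at hm
  | cons x xs ih =>
    cases m with
    | zero =>
      simp only [List.getD_cons_zero] at h1
      simp [lzf, h1]
    | succ m =>
      have hx : x = 0 := by simpa using h0 0 (by omega)
      have : lzf xs = m := by
        refine ih (by simpa using hm) (fun r hr => ?_) (by simpa using h1)
        simpa using h0 (r+1) (by omega)
      simp [lzf, hx, this]

lemma mapIdx_congr' {l : List Int} {f g : Nat → Int → Int}
    (h : ∀ k, k < l.length → f k (l.getD k 0) = g k (l.getD k 0)) :
    l.mapIdx f = l.mapIdx g := by
  apply List.ext_getElem (by simp)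
  intro k h1' h2'
  have hk : k < l.length := by simpa using h1'
  simp only [List.getElem_mapIdx]
  have := h k hk
  rwa [List.getD_eq_getElem _ _ hk] at this

lemma Fsucc (arr : List Int) (num_ones : Int) (m : Nat) (hm : m < arr.length)
    (h1 : arr.getD m 0 = 1) (k : Nat) :
    Fb arr num_ones (m+1) k ↔ Fb arr num_ones m k ∨ Nf arr num_ones m k := by
  constructor
  · rintro ⟨hz, hC, hlt, hi⟩
    by_cases hcase : k + 1 + lzf (arr.drop (k+1)) < m
    · exact Or.inl ⟨hz, hC, hlt, hcase⟩
    · have hEq : k + 1 + lzf (arr.drop (k+1)) = m := by omega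
      refine Or.inr ⟨hz, by omega, by omega, ?_⟩
      intro t ht hkt
      rcases Nat.eq_or_lt_of_le hkt with rfl | hgt
      · exact hz
      · have hr : t - (k+1) < lzf (arr.drop (k+1)) := by omega
        have h0 := lzf_zero_lt (arr.drop (k+1)) _ hr
        rw [getD_drop] at h0
        have ht' : k + 1 + (t - (k + 1)) = t := by omega
        rwa [ht'] at h0
  · rintro (⟨hz, hC, hlt, hi⟩ | ⟨hz, hki, hbud, hall⟩)
    · exact ⟨hz, hC, hlt, by omega⟩
    · have hlen : m - (k+1) < (arr.drop (k+1)).length := by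
        rw [List.length_drop]
        omega
      have hm' : k + 1 + (m - (k+1)) = m := by omega
      have hlz : lzf (arr.drop (k+1)) = m - (k+1) := by
        apply lzf_eq hlen
        · intro r hr
          rw [getD_drop]
          exact hall (k+1+r) (by omega) (by omega)
        · rw [getD_drop, hm', h1]
          norm_num
      refine ⟨hz, ?_, ?_, ?_⟩
      · rw [hlz, getD_drop, hm', h1]
      · rw [hlz]; omega
      · rw [hlz]; omega

lemma fillF_zero (arr : List Int) (num_ones : Int) : fillF arr num_ones 0 = arr := by
  have : arr.mapIdx (fun k v => if Fb arr num_ones 0 k then 1 else v)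
      = arr.mapIdx (fun _ v => v) := by
    apply mapIdx_congr'
    intro k hk
    rw [if_neg]
    intro hF
    exact absurd hF.2.2.2 (by omega)
  rw [fillF, this]
  clear this
  induction arr with
  | nil => rfl
  | cons x xs ih => rw [List.mapIdx_cons]; exact congrArg _ ih

lemma step_not_one (arr : List Int) (num_ones : Int) (m : Nat)
    (h1 : arr.getD m 0 ≠ 1) : fillF arr num_ones m = fillF arr num_ones (m+1) := by
  apply mapIdx_congr'
  intro k hk
  by_cases hF : Fb arr num_ones m k
  · rw [if_pos hF, if_pos ⟨hF.1, hF.2.1, hF.2.2.1, by omega⟩]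
  · have hF' : ¬ Fb arr num_ones (m+1) k := by
      intro hF'
      apply hF
      refine ⟨hF'.1, hF'.2.1, hF'.2.2.1, ?_⟩
      by_contra hnot
      have hEq : k + 1 + lzf (arr.drop (k+1)) = m := by
        have := hF'.2.2.2; omega
      have hone := hF'.2.1
      rw [getD_drop, hEq] at hone
      exact h1 hone
    rw [if_neg hF, if_neg hF']

-- once every newly fillable position lies strictly within the js already processed, the state is final
lemma gF_full (arr : List Int) (num_ones : Int) (m : Nat) (a : Int)
    (hm : m < arr.length) (h1 : arr.getD m 0 = 1)
    (hfull : ∀ k : Nat, Nf arr num_ones m k → (m:Int) - (k:Int) < a) :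
    gF arr num_ones m a = fillF arr num_ones (m+1) := by
  apply mapIdx_congr'
  intro k hk
  have hiff : (Fb arr num_ones m k ∨ (Nf arr num_ones m k ∧ (m:Int) - (k:Int) < a))
      ↔ Fb arr num_ones (m+1) k := by
    rw [Fsucc arr num_ones m hm h1 k]
    constructor
    · rintro (h | ⟨h, _⟩)
      exacts [Or.inl h, Or.inr h]
    · rintro (h | h)
      exacts [Or.inl h, Or.inr ⟨h, hfull k h⟩]
  rw [if_congr hiff rfl rfl]

lemma inner_main (arr : List Int) (num_ones : Int) (m : Nat) (hm : m < arr.length)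
    (h1 : arr.getD m 0 = 1) :
    ∀ (fuel : Nat) (a : Int), 1 ≤ a → (num_ones + 1 - a).toNat = fuel →
    (∀ j : Int, 1 ≤ j → j < a → 0 ≤ (m:Int) - j ∧ arr.getD ((m:Int) - j).toNat 0 = 0) →
    innerA arr m (PySem.List.pyRange a (num_ones+1) 1) (gF arr num_ones m a)
      = fillF arr num_ones (m+1) := by
  intro fuel
  induction fuel with
  | zero =>
    intro a ha hfa H
    rw [PySem.List.pyRange_one_eq_nil (by omega)]
    show gF arr num_ones m a = fillF arr num_ones (m+1)
    exact gF_full arr num_ones m a hm h1 (fun k hk => by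
      have := hk.2.2.1; omega)
  | succ fuel ih =>
    intro a ha hfa H
    rw [PySem.List.pyRange_one_cons (by omega : a < num_ones + 1)]
    by_cases hc : 0 ≤ (m:Int) - a ∧ PySem.List.pyGet? arr ((m:Int) - a) = some 0
    · have hset : (gF arr num_ones m a).set ((m:Int) - a).toNat 1 = gF arr num_ones m (a+1) := by
        have hp : ((m:Int) - a).toNat < m := by omega
        have hplen : ((m:Int) - a).toNat < arr.length := by omega
        have hpz : arr.getD ((m:Int) - a).toNat 0 = 0 := by
          have := hc.2
          rw [show (m:Int) - a = ((((m:Int) - a).toNat : Nat) : Int) by omega,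
            PySem.List.pyGet?_natCast, List.getElem?_eq_getElem hplen] at this
          rw [List.getD_eq_getElem _ _ hplen]
          exact Option.some_injective _ this
        have hNf : Nf arr num_ones m (((m:Int) - a).toNat) := by
          refine ⟨hpz, hp, by omega, ?_⟩
          intro t ht hkt
          rcases Nat.eq_or_lt_of_le hkt with rfl | hgt
          · exact hpz
          · have hj := H ((m:Int) - t) (by omega) (by omega)
            have h2 := hj.2
            rwa [show ((m:Int) - ((m:Int) - (t:Int))).toNat = t by omega] at h2
        apply List.ext_getElem (by simp [gF])
        intro k hk1 hk2
        have hklen : k < arr.length := by simpa [gF] using hk2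
        rw [List.getElem_set]
        by_cases hkp : ((m:Int) - a).toNat = k
        · rw [if_pos hkp]
          have : Fb arr num_ones m k ∨ (Nf arr num_ones m k ∧ (m:Int) - (k:Int) < a + 1) :=
            Or.inr ⟨hkp ▸ hNf, by omega⟩
          simp only [gF, List.getElem_mapIdx, if_pos this]
        · rw [if_neg hkp]
          simp only [gF, List.getElem_mapIdx]
          have hiff : (Fb arr num_ones m k ∨ (Nf arr num_ones m k ∧ (m:Int) - (k:Int) < a))
              ↔ (Fb arr num_ones m k ∨ (Nf arr num_ones m k ∧ (m:Int) - (k:Int) < a + 1)) := by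
            constructor
            · rintro (h | ⟨h, h2⟩)
              exacts [Or.inl h, Or.inr ⟨h, by omega⟩]
            · rintro (h | ⟨h, h2⟩)
              · exact Or.inl h
              · refine Or.inr ⟨h, ?_⟩
                rcases lt_or_eq_of_le (by omega : (m:Int) - (k:Int) ≤ a) with h3 | h3
                · exact h3
                · exact absurd (by omega : ((m:Int) - a).toNat = k) hkp
          rw [if_congr hiff rfl rfl]
      simp only [innerA, if_pos hc, hset]
      exact ih (a+1) (by omega) (by omega) (by
        intro j hj1 hj2
        rcases lt_or_eq_of_le (by omega : j ≤ a) with h3 | h3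
        · exact H j hj1 h3
        · subst h3
          refine ⟨hc.1, ?_⟩
          have := hc.2
          rw [show (m:Int) - j = ((((m:Int) - j).toNat : Nat) : Int) by omega,
            PySem.List.pyGet?_natCast] at this
          have hplen : ((m:Int) - j).toNat < arr.length := by omega
          rw [List.getElem?_eq_getElem hplen] at this
          rw [List.getD_eq_getElem _ _ hplen]
          exact Option.some_injective _ this)
    · simp only [innerA, if_neg hc]
      apply gF_full arr num_ones m a hm h1
      intro k hNf
      by_contra hge
      apply hc
      have hk0 : (0:Int) ≤ (k:Int) := by positivity
      constructor
      · omega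
      · have ha' : ((m:Int) - a).toNat < m := by omega
        have hlen' : ((m:Int) - a).toNat < arr.length := by omega
        have hz := hNf.2.2.2 (((m:Int) - a).toNat) (by omega) (by omega)
        rw [show (m:Int) - a = ((((m:Int) - a).toNat : Nat) : Int) by omega,
          PySem.List.pyGet?_natCast, List.getElem?_eq_getElem hlen']
        rw [List.getD_eq_getElem _ _ hlen'] at hz
        rw [hz]

lemma fold_inv (arr : List Int) (num_ones : Int) :
    ∀ m : Nat, m ≤ arr.length →
    (PySem.List.pyRange 0 (m:Int) 1).foldl (stepA arr num_ones) arr = fillF arr num_ones m := by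
  intro m
  induction m with
  | zero =>
    intro _
    rw [Nat.cast_zero, PySem.List.pyRange_one_eq_nil le_rfl, List.foldl_nil, fillF_zero]
  | succ m ih =>
    intro hm1
    have hm : m < arr.length := by omega
    rw [show ((m + 1 : Nat) : Int) = (m : Int) + 1 by push_cast; ring,
      PySem.List.pyRange_one_succ_right (by positivity : (0:Int) ≤ (m:Int)),
      List.foldl_append, ih (by omega), List.foldl_cons, List.foldl_nil]
    have hFmm : ¬ Fb arr num_ones m m := fun h => absurd h.2.2.2 (by omega)
    have hget : PySem.List.pyGet? (fillF arr num_ones m) ((m : Nat) : Int) = some (arr[m]) := by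
      rw [PySem.List.pyGet?_natCast, List.getElem?_eq_getElem (by simp [fillF]; omega)]
      simp [fillF, List.getElem_mapIdx, hFmm]
    unfold stepA
    rw [hget]
    by_cases h1 : arr[m] = 1
    · rw [if_pos (by simp [h1])]
      have harr : arr.getD m 0 = 1 := by rw [List.getD_eq_getElem _ _ hm]; exact h1
      have hgF : fillF arr num_ones m = gF arr num_ones m 1 := by
        apply mapIdx_congr'
        intro k hk
        have hiff : Fb arr num_ones m k
            ↔ (Fb arr num_ones m k ∨ (Nf arr num_ones m k ∧ (m:Int) - (k:Int) < 1)) := by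
          constructor
          · exact Or.inl
          · rintro (h | ⟨h, h2⟩)
            · exact h
            · exact absurd h2 (by have := h.2.1; omega)
        rw [if_congr hiff rfl rfl]
      rw [hgF]
      exact inner_main arr num_ones m hm harr (num_ones + 1 - 1).toNat 1 le_rfl rfl
        (fun j hj1 hj2 => absurd (lt_of_le_of_lt hj1 hj2) (by omega))
    · rw [if_neg (by simp [h1])]
      exact step_not_one arr num_ones m
        (fun h => h1 (by rwa [List.getD_eq_getElem _ _ hm] at h))

lemma A_eq_spec (arr : List Int) (num_ones : Int) : preplace_ones arr num_ones = specL arr num_ones := by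
  unfold preplace_ones
  rw [fold_inv arr num_ones arr.length le_rfl]
  apply mapIdx_congr'
  intro k hk
  have hiff : Fb arr num_ones arr.length k
      ↔ (arr.getD k 0 = 0 ∧ (arr.drop (k+1)).getD (lzf (arr.drop (k+1))) 0 = 1 ∧
          ((lzf (arr.drop (k+1)) : Int) < num_ones)) := by
    constructor
    · rintro ⟨hz, hC, hlt, _⟩
      exact ⟨hz, hC, hlt⟩
    · rintro ⟨hz, hC, hlt⟩
      refine ⟨hz, hC, hlt, ?_⟩
      have hlen := lzf_lt_length hC
      rw [List.length_drop] at hlen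
      omega
  rw [if_congr hiff rfl rfl]

lemma foldr_altGo (num_ones : Int) (l : List Int) :
    l.foldr (fun x (s : Int × List Int) =>
      if x = 1 then (num_ones, s.2 ++ [1])
      else if x = 0 ∧ 0 < s.1 then (s.1 - 1, s.2 ++ [1])
      else (0, s.2 ++ [x])) ((0:Int), ([]:List Int))
    = ((altGo num_ones l).1, (altGo num_ones l).2.reverse) := by
  induction l with
  | nil => rfl
  | cons x rest ih =>
    rw [List.foldr_cons, ih]
    simp only [altGo]
    split_ifs <;> simp

lemma altGo_fst (num_ones : Int) (l : List Int) :
    (altGo num_ones l).1 =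
      if l.getD (lzf l) 0 = 1 then
        (if lzf l = 0 then num_ones else if (lzf l : Int) < num_ones then num_ones - lzf l else 0)
      else 0 := by
  induction l with
  | nil => simp [altGo, lzf]
  | cons x rest ih =>
    by_cases hx1 : x = 1
    · subst hx1
      simp [altGo, lzf]
    · by_cases hx0 : x = 0
      · subst hx0
        simp only [altGo]
        rw [ih]
        simp only [lzf]
        norm_num
        split_ifs <;> simp_all <;> omega
      · simp [altGo, lzf, hx1, hx0]

lemma altGo_fst_pos (num_ones : Int) (l : List Int) :
    0 < (altGo num_ones l).1 ↔ (l.getD (lzf l) 0 = 1 ∧ (lzf l : Int) < num_ones) := by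
  rw [altGo_fst]
  split_ifs <;> simp_all

lemma altGo_snd (num_ones : Int) (l : List Int) : (altGo num_ones l).2 = specL l num_ones := by
  induction l with
  | nil => simp [altGo, specL]
  | cons x rest ih =>
    have hspec : specL (x :: rest) num_ones
        = (if x = 0 ∧ rest.getD (lzf rest) 0 = 1 ∧ ((lzf rest : Int) < num_ones) then 1 else x)
          :: specL rest num_ones := by
      unfold specL
      rw [List.mapIdx_cons]
      simp only [List.drop_succ_cons, List.drop_zero]
      rfl
    rw [hspec]
    by_cases hx1 : x = 1
    · subst hx1
      simp only [altGo]
      rw [ih]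
      norm_num
    · by_cases hx0 : x = 0
      · subst hx0
        have hiff := altGo_fst_pos num_ones rest
        simp only [altGo, if_neg hx1]
        split_ifs with h1 h2 h2 <;> simp_all
      · simp [altGo, hx1, hx0]
        exact ih

lemma B_eq_spec (arr : List Int) (num_ones : Int) : preplace_ones_alt arr num_ones = specL arr num_ones := by
  unfold preplace_ones_alt
  rw [List.foldl_reverse, foldr_altGo, ← altGo_snd num_ones arr]
  simp

-- ===== VERDICT (by name: the statement is the Claim_ definition above) =====
theorem preplace_ones_spec : Claim_equal_preplace_ones := by
  intro arr num_ones _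
  unfold Spec_preplace_ones
  rw [A_eq_spec, B_eq_spec]
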